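-- pv_equiv track=rewrite | github.com/blhguo/hypomeals | hypomeals/meals/utils.py | next_alphanumeric_str
-- ===== SOURCE A (Python) =====
-- def _do_carry(code, code_range, carry):
--     code += carry
--     if code > code_range[-1]:
--         code = code_range[0]
--         return code, 1
--     return code, 0
--
-- def next_alphanumeric_str(s: str) -> str:
--     """
--     Generates the "next" alphanumeric string from s. For example, if s were "abc", then
--     "abd" would be returned. Same goes for numbers: "ab10" will become "ab11".
--     :param s: a string
--     :return: the next alphanumeric string
--     """
--
--     if not s:
--         raise RuntimeError("Cannot create next string from empty string")
--     ascii_codes = [ord(char) for char in s]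
--     ascii_lower = range(97, 123)
--     ascii_upper = range(65, 91)
--     ascii_numbers = range(48, 58)
--     carry = 1
--     result = []
--     for i, code in enumerate(ascii_codes[::-1]):
--         if carry == 0:
--             result = ascii_codes[0 : len(ascii_codes) - i] + result
--             break
--         is_alphanumeric = False
--         for code_range in [ascii_lower, ascii_upper, ascii_numbers]:
--             if code in code_range:
--                 code, carry = _do_carry(code, code_range, carry)
--                 is_alphanumeric = True
--                 break
--         if not is_alphanumeric:
--             raise RuntimeError(f"character '{chr(code)}' is not alphanumeric.")
--         result.insert(0, code)
--     if carry != 0: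
--         result.insert(0, ord("1"))
--     return "".join([chr(char) for char in result])
-- ===== SOURCE B (Python) =====
-- def next_alphanumeric_str(s: str) -> str:
--     if not s:
--         raise RuntimeError("Cannot create next string from empty string")
--     body = s.rstrip('zZ9')
--     tail = s[len(body):].translate(str.maketrans('zZ9', 'aA0'))
--     if not body:
--         return '1' + tail
--     p = body[-1]
--     if not ('a' <= p < 'z' or 'A' <= p < 'Z' or '0' <= p < '9'):
--         raise RuntimeError(f"character '{p}' is not alphanumeric.")
--     return body[:-1] + chr(ord(p) + 1) + tail
-- ===== Notes on version B (the rewrite author's own statement) =====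
-- stated objective: simpler
-- what changed: B has no carry variable and no per-character increment loop: it strips the maximal trailing run of class-top characters with rstrip, rewrites that suffix to the class minima in one str.translate pass, and increments the single character left of the stripped run (prepending a leading one-digit if the whole string was stripped); Pre_ excludes exactly the inputs on which both implementations raise RuntimeError (empty string, or a non-alphanumeric character immediately left of the trailing top-character run).
import Mathlib
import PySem

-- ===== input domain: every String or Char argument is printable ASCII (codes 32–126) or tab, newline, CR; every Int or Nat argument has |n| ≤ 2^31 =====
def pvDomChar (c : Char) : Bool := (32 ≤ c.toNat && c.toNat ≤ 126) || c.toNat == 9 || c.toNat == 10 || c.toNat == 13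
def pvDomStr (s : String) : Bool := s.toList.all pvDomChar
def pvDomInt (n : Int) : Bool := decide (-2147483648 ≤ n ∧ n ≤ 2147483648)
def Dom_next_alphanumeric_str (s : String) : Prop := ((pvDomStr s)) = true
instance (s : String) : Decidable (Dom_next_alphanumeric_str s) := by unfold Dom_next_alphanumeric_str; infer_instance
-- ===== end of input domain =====

-- B replaces A's right-to-left carry loop by three staged passes: rstrip the trailing
-- 'z'/'Z'/'9' run, translate that suffix to class minima, increment the one char before it
-- (objective: simpler).

-- ===== PORT A =====
-- A Python range(a, b) (step 1, nonempty here) is ported as the pair (a, b):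
-- `code in r` is a ≤ code < b, `r[-1]` is b - 1, `r[0]` is a (exact for these ranges).
def pvDoCarry (code : Int) (code_range : Int × Int) (carry : Int) : Int × Int :=
  let code := code + carry
  if code > code_range.2 - 1 then (code_range.1, 1) else (code, 0)

-- the inner `for code_range in [...]` loop with its break
def pvFindRange (code : Int) : List (Int × Int) → Option (Int × Int)
  | [] => none
  | r :: rs => if r.1 ≤ code ∧ code < r.2 then some r else pvFindRange code rs

-- the outer `for i, code in enumerate(ascii_codes[::-1])` loop; `none` = the RuntimeError raise;
-- `ascii_codes[0 : len(ascii_codes) - i]` = take (length - i) (slice with nonnegative bounds)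
def pvLoopA (ascii_codes : List Int) : List Int → Nat → Int → List Int → Option (Int × List Int)
  | [], _, carry, result => some (carry, result)
  | code :: rest, i, carry, result =>
    if carry == 0 then
      some (carry, ascii_codes.take (ascii_codes.length - i) ++ result)
    else
      match pvFindRange code [(97, 123), (65, 91), (48, 58)] with
      | none => none
      | some cr =>
        let p := pvDoCarry code cr carry
        pvLoopA ascii_codes rest (i + 1) p.2 (p.1 :: result)

def next_alphanumeric_str (s : String) : String :=
  if s.toList.isEmpty then ""   -- Python raises RuntimeError here; excluded by Pre_
  else
    let ascii_codes := s.toList.map (fun c => (c.toNat : Int))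
    match pvLoopA ascii_codes ascii_codes.reverse 0 1 [] with
    | none => ""                -- Python raises RuntimeError here; excluded by Pre_
    | some (carry, result) =>
      let result := if carry != 0 then (49 : Int) :: result else result
      String.mk (result.map (fun code => Char.ofNat code.toNat))

-- ===== PORT B =====
-- the character set of rstrip('zZ9')
def pvIsTop (c : Char) : Bool := c == 'z' || c == 'Z' || c == '9'
-- str.maketrans('zZ9','aA0') + translate, applied per character (identity elsewhere); exact
def pvWrap (c : Char) : Char :=
  if c == 'z' then 'a' else if c == 'Z' then 'A' else if c == '9' then '0' else c

-- s.rstrip('zZ9') is ported by hand as dropWhile pvIsTop on the reversed char list (exact);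
-- body[-1]/body[:-1] are read off the un-reversed dropWhile result (head = last char of body)
def next_alphanumeric_str_alt (s : String) : String :=
  if s.toList.isEmpty then ""   -- raise; excluded by Pre_
  else
    let d := s.toList.reverse.dropWhile pvIsTop   -- body = d.reverse
    let tail := (s.toList.drop d.length).map pvWrap   -- s[len(body):].translate(...)
    match d with
    | [] => String.mk ('1' :: tail)
    | p :: rest =>   -- p = body[-1], rest.reverse = body[:-1]
      if ('a'.toNat ≤ p.toNat ∧ p.toNat < 'z'.toNat) ∨
         ('A'.toNat ≤ p.toNat ∧ p.toNat < 'Z'.toNat) ∨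
         ('0'.toNat ≤ p.toNat ∧ p.toNat < '9'.toNat) then
        String.mk (rest.reverse ++ Char.ofNat (p.toNat + 1) :: tail)
      else ""   -- raise; excluded by Pre_

-- ===== PRECONDITION & SPEC =====
def pvIsAlnum (c : Char) : Bool :=
  (97 ≤ c.toNat && c.toNat ≤ 122) || (65 ≤ c.toNat && c.toNat ≤ 90) || (48 ≤ c.toNat && c.toNat ≤ 57)

-- Pre_ excludes exactly the inputs on which A raises RuntimeError (and B raises too): the empty
-- string, and strings whose right-to-left carry scan reaches a non-alphanumeric character,
-- i.e. whose first character left of the maximal 'z'/'Z'/'9' suffix is not alphanumeric.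
def Pre_next_alphanumeric_str (s : String) : Prop :=
  s.toList ≠ [] ∧ ((s.toList.reverse.dropWhile pvIsTop).take 1).all pvIsAlnum = true
instance (s : String) : Decidable (Pre_next_alphanumeric_str s) := by
  unfold Pre_next_alphanumeric_str; infer_instance

def pvWitness_next_alphanumeric_str : String := "ab"

def Spec_next_alphanumeric_str (s : String) (out : String) : Prop := out = next_alphanumeric_str_alt s
instance (s : String) (out : String) : Decidable (Spec_next_alphanumeric_str s out) := by unfold Spec_next_alphanumeric_str; infer_instance

-- ===== CLAIM (what is proved, stated in full; the proofs are below) =====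
def Claim_equal_next_alphanumeric_str : Prop := ∀ (s : String), Dom_next_alphanumeric_str s → Pre_next_alphanumeric_str s → Spec_next_alphanumeric_str s (next_alphanumeric_str s)

-- ===== LEMMAS AND PROOFS =====

theorem pv_char_eq_of_toNat (c d : Char) (h : c.toNat = d.toNat) : c = d := by
  have := congrArg Char.ofNat h
  rwa [Char.ofNat_toNat, Char.ofNat_toNat] at this

-- A's break step: once carry is 0, the loop prepends the untouched prefix and stops.
theorem pv_loopA_zero (codes r : List Int) (i : Nat) (res : List Int)
    (h : i + r.length = codes.length) :
    pvLoopA codes r i 0 res = some (0, codes.take (codes.length - i) ++ res) := by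
  cases r with
  | nil =>
    have : codes.length - i = 0 := by simp at h; omega
    simp [pvLoopA, this]
  | cons a l => simp [pvLoopA]

theorem pvDoCarry_wrap (code a b : Int) (h : code + 1 > b - 1) :
    pvDoCarry code (a, b) 1 = (a, 1) := by
  unfold pvDoCarry; rw [if_pos h]

theorem pvDoCarry_step (code a b : Int) (h : ¬ (code + 1 > b - 1)) :
    pvDoCarry code (a, b) 1 = (code + 1, 0) := by
  unfold pvDoCarry; rw [if_neg h]

-- the class facts shared by the three alphanumeric ranges
theorem pv_class_data (c : Char) (h : pvIsAlnum c = true) :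
    ∃ (a b : Nat) (lo hi : Char), lo.toNat = a ∧ hi.toNat = b ∧ a ≤ c.toNat ∧ c.toNat ≤ b ∧
      pvFindRange ((c.toNat : Int)) [(97, 123), (65, 91), (48, 58)] = some ((a : Int), (b : Int) + 1) ∧
      pvWrap hi = lo ∧
      (pvIsTop c = true ↔ c.toNat = b) ∧
      (c.toNat ≠ b →
        (('a'.toNat ≤ c.toNat ∧ c.toNat < 'z'.toNat) ∨
         ('A'.toNat ≤ c.toNat ∧ c.toNat < 'Z'.toNat) ∨
         ('0'.toNat ≤ c.toNat ∧ c.toNat < '9'.toNat))) := by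
  unfold pvIsAlnum at h
  simp only [Bool.or_eq_true, Bool.and_eq_true, decide_eq_true_eq] at h
  have hz : ('z' : Char).toNat = 122 := by decide
  have hZ : ('Z' : Char).toNat = 90 := by decide
  have h9 : ('9' : Char).toNat = 57 := by decide
  have htop2 : ∀ (d : Char), c.toNat = d.toNat → pvIsTop d = true → pvIsTop c = true := by
    intro d hd ht; rwa [pv_char_eq_of_toNat c d hd]
  have htop1 : pvIsTop c = true → (c.toNat = 122 ∨ c.toNat = 90 ∨ c.toNat = 57) := by
    intro ht; unfold pvIsTop at ht
    simp only [Bool.or_eq_true, beq_iff_eq] at ht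
    rcases ht with (e | e) | e
    · rw [e]; exact Or.inl hz
    · rw [e]; exact Or.inr (Or.inl hZ)
    · rw [e]; exact Or.inr (Or.inr h9)
  rcases h with (⟨h1, h2⟩ | ⟨h1, h2⟩) | ⟨h1, h2⟩
  · refine ⟨97, 122, 'a', 'z', by decide, hz, h1, h2, ?_, by decide, ?_, ?_⟩
    · unfold pvFindRange
      rw [if_pos (by constructor <;> omega)]
      norm_num
    · constructor
      · intro ht; rcases htop1 ht with e | e | e <;> omega
      · intro hb; exact htop2 'z' (by rw [hz]; exact hb) (by decide)
    · intro hb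
      have ea : ('a' : Char).toNat = 97 := by decide
      refine Or.inl ⟨by omega, by omega⟩
  · refine ⟨65, 90, 'A', 'Z', by decide, hZ, h1, h2, ?_, by decide, ?_, ?_⟩
    · unfold pvFindRange
      rw [if_neg (by omega)]
      unfold pvFindRange
      rw [if_pos (by constructor <;> omega)]
      norm_num
    · constructor
      · intro ht; rcases htop1 ht with e | e | e <;> omega
      · intro hb; exact htop2 'Z' (by rw [hZ]; exact hb) (by decide)
    · intro hb
      have ea : ('A' : Char).toNat = 65 := by decide
      refine Or.inr (Or.inl ⟨by omega, by omega⟩)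
  · refine ⟨48, 57, '0', '9', by decide, h9, h1, h2, ?_, by decide, ?_, ?_⟩
    · unfold pvFindRange
      rw [if_neg (by omega)]
      unfold pvFindRange
      rw [if_neg (by omega)]
      unfold pvFindRange
      rw [if_pos (by constructor <;> omega)]
      norm_num
    · constructor
      · intro ht; rcases htop1 ht with e | e | e <;> omega
      · intro hb; exact htop2 '9' (by rw [h9]; exact hb) (by decide)
    · intro hb
      have ea : ('0' : Char).toNat = 48 := by decide
      refine Or.inr (Or.inr ⟨by omega, by omega⟩)

-- non-alphanumeric characters are not top characters
theorem pv_not_top_of_not_alnum (c : Char) (h : ¬ pvIsAlnum c = true) : pvIsTop c = false := by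
  unfold pvIsTop
  have e1 : (c == 'z') = false := by
    simp only [beq_eq_false_iff_ne]; intro e; exact h (by rw [e]; decide)
  have e2 : (c == 'Z') = false := by
    simp only [beq_eq_false_iff_ne]; intro e; exact h (by rw [e]; decide)
  have e3 : (c == '9') = false := by
    simp only [beq_eq_false_iff_ne]; intro e; exact h (by rw [e]; decide)
  simp [e1, e2, e3]

-- B's final expression parameterised by the not-yet-processed reversed remainder r; when the
-- already processed part is all-top, r.dropWhile pvIsTop = full.reverse.dropWhile pvIsTop.
def pvRhsB (full r : List Char) : String :=
  let d := r.dropWhile pvIsTop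
  let tail := (full.drop d.length).map pvWrap
  match d with
  | [] => String.mk ('1' :: tail)
  | p :: rest =>
    if ('a'.toNat ≤ p.toNat ∧ p.toNat < 'z'.toNat) ∨
       ('A'.toNat ≤ p.toNat ∧ p.toNat < 'Z'.toNat) ∨
       ('0'.toNat ≤ p.toNat ∧ p.toNat < '9'.toNat) then
      String.mk (rest.reverse ++ Char.ofNat (p.toNat + 1) :: tail)
    else ""

-- core equivalence: A's loop, still carrying, over the reversed remainder r equals B's staged value
theorem pv_loop_eq (full : List Char) : ∀ (r processed : List Char),
    full.reverse = processed ++ r →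
    processed.all pvIsTop = true →
    ((r.dropWhile pvIsTop).take 1).all pvIsAlnum = true →
    (match pvLoopA (full.map (fun c => (c.toNat : Int))) (r.map (fun c => (c.toNat : Int)))
        processed.length 1 (((processed.map pvWrap).reverse).map (fun c => (c.toNat : Int))) with
      | none => ""
      | some (carry, result) =>
        String.mk ((if carry != 0 then (49 : Int) :: result else result).map
          (fun code => Char.ofNat code.toNat)))
    = pvRhsB full r := by
  intro r
  induction r with
  | nil =>
    intro processed hsplit hptop _
    have hfull : full = processed.reverse := by
      have := congrArg List.reverse hsplit
      simpa using this
    simp only [List.map_nil, pvLoopA, pvRhsB, List.dropWhile_nil]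
    rw [if_pos (by decide)]
    subst hfull
    simp [List.map_map, Function.comp_def]
  | cons c rest ih =>
    intro processed hsplit hptop hpre
    by_cases halnum : pvIsAlnum c = true
    · obtain ⟨a, b, lo, hi, hloA, hhiA, hac, hcb, hfr, hwrap, htop, hrange⟩ := pv_class_data c halnum
      simp only [List.map_cons, pvLoopA]
      rw [if_neg (by norm_num), hfr]
      simp only []
      by_cases hb : c.toNat = b
      · -- wrapping character: A continues leftward; B's dropWhile passes over it
        have hctop : pvIsTop c = true := htop.mpr hb
        have hceq : c = hi := pv_char_eq_of_toNat c hi (by omega)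
        rw [pvDoCarry_wrap _ _ _ (by push_cast; omega)]
        have hstack : ((a : Nat) : Int) :: ((processed.map pvWrap).reverse).map (fun c => ((c.toNat : Int)))
            = (((processed ++ [c]).map pvWrap).reverse).map (fun c => ((c.toNat : Int))) := by
          simp [hceq, hwrap, hloA]
        have hpre2 : ((rest.dropWhile pvIsTop).take 1).all pvIsAlnum = true := by
          rwa [List.dropWhile_cons_of_pos hctop] at hpre
        have hsplit2 : full.reverse = (processed ++ [c]) ++ rest := by
          rw [hsplit]; simp
        have hptop2 : (processed ++ [c]).all pvIsTop = true := by
          simp [List.all_append, hptop, hctop]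
        have hlen2 : (processed ++ [c]).length = processed.length + 1 := by simp
        have := ih (processed ++ [c]) hsplit2 hptop2 hpre2
        rw [hlen2] at this
        calc (match pvLoopA (full.map (fun c => (c.toNat : Int)))
                (rest.map (fun c => (c.toNat : Int))) (processed.length + 1) ((a : Int), (1 : Int)).2
                (((a : Int), (1 : Int)).1 :: ((processed.map pvWrap).reverse).map (fun c => (c.toNat : Int))) with
              | none => ""
              | some (carry, result) =>
                String.mk ((if carry != 0 then (49 : Int) :: result else result).map
                  (fun code => Char.ofNat code.toNat)))
            = (match pvLoopA (full.map (fun c => (c.toNat : Int)))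
                (rest.map (fun c => (c.toNat : Int))) (processed.length + 1) 1
                ((((processed ++ [c]).map pvWrap).reverse).map (fun c => (c.toNat : Int))) with
              | none => ""
              | some (carry, result) =>
                String.mk ((if carry != 0 then (49 : Int) :: result else result).map
                  (fun code => Char.ofNat code.toNat))) := by rw [← hstack]
          _ = pvRhsB full rest := this
          _ = pvRhsB full (c :: rest) := by
              unfold pvRhsB
              rw [List.dropWhile_cons_of_pos hctop]
      · -- pivot character: A breaks on the next iteration; B's dropWhile stops here
        have hctop : pvIsTop c = false := by
          cases e : pvIsTop c
          · rfl
          · exact absurd (htop.mp e) hb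
        rw [pvDoCarry_step _ _ _ (by push_cast; omega)]
        have hlenfull : processed.length + (c :: rest).length = full.length := by
          have := congrArg List.length hsplit
          simp at this; simp; omega
        have hz := pv_loopA_zero (full.map (fun c => (c.toNat : Int)))
          (rest.map (fun c => (c.toNat : Int))) (processed.length + 1)
          (((c.toNat : Int) + 1, (0 : Int)).1 :: ((processed.map pvWrap).reverse).map (fun c => (c.toNat : Int)))
          (by simp at hlenfull ⊢; omega)
        rw [show ((c.toNat : Int) + 1, (0 : Int)).2 = 0 from rfl, hz]
        have hfull : full = rest.reverse ++ c :: processed.reverse := by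
          have := congrArg List.reverse hsplit
          simpa using this
        have hlen2 : (full.map (fun c => ((c.toNat : Int)))).length - (processed.length + 1) = rest.length := by
          simp at hlenfull ⊢; omega
        unfold pvRhsB
        rw [List.dropWhile_cons_of_neg (by simp [hctop])]
        simp only []
        rw [if_pos (hrange hb), if_neg (by decide)]
        rw [hlen2]
        have htake : (full.map (fun c => ((c.toNat : Int)))).take rest.length
            = (rest.reverse).map (fun c => ((c.toNat : Int))) := by
          rw [← List.map_take, hfull]
          congr 1
          rw [List.take_append_of_le_length (by simp)]
          simp
        have hdrop : full.drop (c :: rest).length = processed.reverse := by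
          rw [hfull, show (c :: rest).length = rest.reverse.length + 1 by simp, List.drop_append]
          simp
        rw [htake, hdrop]
        rw [List.map_append, List.map_map, List.map_cons, List.map_map]
        simp [Function.comp_def, List.map_reverse]
    · -- a non-alphanumeric head contradicts the precondition
      exfalso
      rw [List.dropWhile_cons_of_neg (by simp [pv_not_top_of_not_alnum c halnum])] at hpre
      simp [List.take] at hpre
      exact halnum hpre

-- ===== VERDICT (by name: the statement is the Claim_ definition above) =====
theorem next_alphanumeric_str_spec : Claim_equal_next_alphanumeric_str := by
  intro s _ hpre
  obtain ⟨hne, hpre2⟩ := hpre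
  unfold Spec_next_alphanumeric_str next_alphanumeric_str next_alphanumeric_str_alt
  have hempty : s.toList.isEmpty = false := by
    cases h : s.toList with
    | nil => exact absurd h hne
    | cons a l => simp
  rw [hempty]
  simp only [Bool.false_eq_true, if_false]
  have h := pv_loop_eq s.toList s.toList.reverse [] (by simp) (by simp) hpre2
  simp only [List.map_nil, List.length_nil, List.map_reverse, List.reverse_nil] at h
  rw [h]
  rfl
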